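-- pv_equiv track=rewrite | github.com/yymurata/mediapipe311 | plot_gait.py | mask_to_segments
-- ===== SOURCE A (Python) =====
-- def mask_to_segments(times, mask):
--     segments = []
--     in_segment = False
--     start_t = None
--     for t, is_bad in zip(times, mask):
--         if is_bad and not in_segment:
--             start_t = t
--             in_segment = True
--         elif not is_bad and in_segment:
--             segments.append((start_t, t))
--             in_segment = False
--     if in_segment:
--         segments.append((start_t, times[-1]))
--     return segments
-- ===== SOURCE B (Python) =====
-- def mask_to_segments(times, mask):
--     pairs = list(zip(times, mask))
--     prev = [False] + [b for _, b in pairs]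
--     starts = [t for (t, b), pb in zip(pairs, prev) if b and not pb]
--     ends = [t for (t, b), pb in zip(pairs[1:], [b for _, b in pairs]) if pb and not b]
--     if pairs and pairs[-1][1]:
--         ends.append(times[-1])
--     return list(zip(starts, ends))
-- ===== Notes on version B (the rewrite author's own statement) =====
-- stated objective: alternative
-- what changed: Replaced A's stateful single-pass flag machine (in_segment/start_t with a trailing fix-up append) by a staged edge-list decomposition: two shifted-zip comprehensions compute the rising-edge start times and the falling-edge end times, the trailing end is appended if the last zipped entry is bad, and the segments are the zip of the two lists.
import Mathlib
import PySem

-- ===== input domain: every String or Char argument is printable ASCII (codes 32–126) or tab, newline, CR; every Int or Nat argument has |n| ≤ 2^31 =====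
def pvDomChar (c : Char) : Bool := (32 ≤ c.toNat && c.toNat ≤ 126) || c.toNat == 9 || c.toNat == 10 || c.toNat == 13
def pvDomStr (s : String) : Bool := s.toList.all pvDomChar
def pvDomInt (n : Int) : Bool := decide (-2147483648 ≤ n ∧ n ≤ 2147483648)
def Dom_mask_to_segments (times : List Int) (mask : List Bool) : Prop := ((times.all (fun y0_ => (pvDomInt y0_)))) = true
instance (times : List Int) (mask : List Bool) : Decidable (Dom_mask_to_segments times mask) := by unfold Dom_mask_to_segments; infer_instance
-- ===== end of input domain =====

-- B replaces A's stateful flag machine by an edge-list decomposition: build rising-edge start times and falling-edge end times as shifted-zip comprehensions, add the trailing end, and zip them; same cost, different structure.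


-- ===== PORT A =====
-- A's loop over zip(times, mask) with state (segments, in_segment, start_t); start_t is Option Int (None initially).
def aLoop : List (Int × Bool) → List (Int × Int) → Bool → Option Int → (List (Int × Int) × Bool × Option Int)
  | [], segs, ins, st => (segs, ins, st)
  | (t, b) :: rest, segs, ins, st =>
    if b && !ins then aLoop rest segs true (some t)
    else if !b && ins then aLoop rest (segs ++ [(st.getD 0, t)]) false st
    else aLoop rest segs ins st

-- times[-1]; only read when in_segment, hence times nonempty, so the default is unreachable.
def pyLastD (times : List Int) : Int := (PySem.List.pyGet? times (-1)).getD 0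

def mask_to_segments (times : List Int) (mask : List Bool) : List (Int × Int) :=
  let r := aLoop (times.zip mask) [] false none
  if r.2.1 then r.1 ++ [(r.2.2.getD 0, pyLastD times)] else r.1

-- ===== PORT B =====
-- B: starts = times at rising edges (bad now, previous absent/good), ends = times at
-- falling edges (previous bad, good now), plus times[-1] if the last zipped entry is bad;
-- the result is the zip of the two edge lists.  The shifted-zip comprehensions are ported
-- as filterMap over List.zip with the previous-boolean list.
def mask_to_segments_alt (times : List Int) (mask : List Bool) : List (Int × Int) :=
  let pairs := times.zip mask
  let prev := false :: pairs.map Prod.snd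
  let starts := (pairs.zip prev).filterMap
    (fun x => if x.1.2 && !x.2 then some x.1.1 else none)
  let ends0 := ((pairs.drop 1).zip (pairs.map Prod.snd)).filterMap
    (fun x => if x.2 && !x.1.2 then some x.1.1 else none)
  let ends := if ((pairs.getLast?.map Prod.snd).getD false) then ends0 ++ [pyLastD times] else ends0
  starts.zip ends

-- ===== PRECONDITION & SPEC =====
def Spec_mask_to_segments (times : List Int) (mask : List Bool) (out : List (Int × Int)) : Prop := out = mask_to_segments_alt times mask
instance (times : List Int) (mask : List Bool) (out : List (Int × Int)) : Decidable (Spec_mask_to_segments times mask out) := by unfold Spec_mask_to_segments; infer_instance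

-- ===== CLAIM (what is proved, stated in full; the proofs are below) =====
def Claim_equal_mask_to_segments : Prop := ∀ (times : List Int) (mask : List Bool), Dom_mask_to_segments times mask → Spec_mask_to_segments times mask (mask_to_segments times mask)

-- ===== LEMMAS AND PROOFS =====

-- Canonical reference form used only by the proofs: run extraction over the zipped pairs.
mutual
def runsOut (tl : Int) : List (Int × Bool) → List (Int × Int)
  | [] => []
  | (t, b) :: rest => if b then runsIn tl t rest else runsOut tl rest

def runsIn (tl : Int) (start : Int) : List (Int × Bool) → List (Int × Int)
  | [] => [(start, tl)]
  | (t, b) :: rest => if b then runsIn tl start rest else (start, t) :: runsOut tl rest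
end

-- recursive forms of B's two comprehensions, carrying the previous boolean
def sRec : Bool → List (Int × Bool) → List Int
  | _, [] => []
  | pb, (t, b) :: rest => if b && !pb then t :: sRec b rest else sRec b rest

def eRec : Bool → List (Int × Bool) → List Int
  | _, [] => []
  | pb, (t, b) :: rest => if pb && !b then t :: eRec b rest else eRec b rest

-- ends with the trailing element folded into the base case
def fRec (tl : Int) : Bool → List (Int × Bool) → List Int
  | pb, [] => if pb then [tl] else []
  | pb, (t, b) :: rest => if pb && !b then t :: fRec tl b rest else fRec tl b rest

-- closing step of A: append the trailing segment iff the loop ends inside a run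
def finishA (times : List Int) (r : List (Int × Int) × Bool × Option Int) : List (Int × Int) :=
  if r.2.1 then r.1 ++ [(r.2.2.getD 0, pyLastD times)] else r.1

-- A's loop + closing equals the run-extraction reference, for any accumulator
theorem aLoop_eq_runs (times : List Int) (l : List (Int × Bool)) :
    (∀ segs st, finishA times (aLoop l segs false st) = segs ++ runsOut (pyLastD times) l) ∧
    (∀ segs s, finishA times (aLoop l segs true (some s)) = segs ++ runsIn (pyLastD times) s l) := by
  induction l with
  | nil => exact ⟨fun segs st => by simp [aLoop, finishA, runsOut], fun segs s => by simp [aLoop, finishA, runsIn]⟩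
  | cons p rest ih =>
    obtain ⟨t, b⟩ := p
    refine ⟨fun segs st => ?_, fun segs s => ?_⟩
    · cases b with
      | true => simpa [aLoop, runsOut] using ih.2 segs t
      | false => simpa [aLoop, runsOut] using ih.1 segs st
    · cases b with
      | true => simpa [aLoop, runsIn] using ih.2 segs s
      | false => simpa [aLoop, runsIn] using ih.1 (segs ++ [(s, t)]) (some s)

-- B's start comprehension computes sRec
theorem starts_eq_sRec (pb : Bool) (l : List (Int × Bool)) :
    (l.zip (pb :: l.map Prod.snd)).filterMap
      (fun x => if x.1.2 && !x.2 then some x.1.1 else none) = sRec pb l := by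
  induction l generalizing pb with
  | nil => rfl
  | cons p rest ih =>
    obtain ⟨t, b⟩ := p
    have ihb := ih b
    cases b <;> cases pb <;> simp_all [sRec]

-- B's end comprehension computes eRec
theorem ends_eq_eRec (pb : Bool) (l : List (Int × Bool)) :
    (l.zip (pb :: l.map Prod.snd)).filterMap
      (fun x => if x.2 && !x.1.2 then some x.1.1 else none) = eRec pb l := by
  induction l generalizing pb with
  | nil => rfl
  | cons p rest ih =>
    obtain ⟨t, b⟩ := p
    have ihb := ih b
    cases b <;> cases pb <;> simp_all [eRec]

-- folding the trailing append into the recursion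
theorem fRec_eq (tl : Int) (pb : Bool) (l : List (Int × Bool)) :
    fRec tl pb l = eRec pb l ++ (if (l.map Prod.snd).getLast?.getD pb then [tl] else []) := by
  induction l generalizing pb with
  | nil => cases pb <;> simp [fRec, eRec]
  | cons p rest ih =>
    obtain ⟨t, b⟩ := p
    have hlast : ((b :: rest.map Prod.snd).getLast?.getD pb) = ((rest.map Prod.snd).getLast?.getD b) := by
      cases h : (rest.map Prod.snd) <;> simp [List.getLast?_cons, h]
    simp only [fRec, eRec, List.map_cons, hlast]
    cases pb <;> cases b <;> simp [ih]

-- zipping the two edge lists yields exactly the run extraction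
theorem zip_edges_eq_runs (tl : Int) (l : List (Int × Bool)) :
    ((sRec false l).zip (fRec tl false l) = runsOut tl l) ∧
    (∀ s, (s :: sRec true l).zip (fRec tl true l) = runsIn tl s l) := by
  induction l with
  | nil => exact ⟨rfl, fun s => rfl⟩
  | cons p rest ih =>
    obtain ⟨t, b⟩ := p
    refine ⟨?_, fun s => ?_⟩
    · cases b with
      | true => simpa [sRec, fRec, runsOut] using ih.2 t
      | false => simpa [sRec, fRec, runsOut] using ih.1
    · cases b with
      | true => simpa [sRec, fRec, runsIn] using ih.2 s
      | false => simpa [sRec, fRec, runsIn] using ih.1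

-- last boolean of a cons list of pairs
theorem getLast_snd (x : Int × Bool) (r : List (Int × Bool)) :
    (((x :: r).getLast?.map Prod.snd).getD false) = ((r.map Prod.snd).getLast?.getD x.2) := by
  induction r generalizing x with
  | nil => simp
  | cons y r ih =>
    have := ih y
    simpa [List.getLast?_cons, List.map_cons] using this

-- B computes the run extraction
theorem alt_eq_runs (times : List Int) (mask : List Bool) :
    mask_to_segments_alt times mask = runsOut (pyLastD times) (times.zip mask) := by
  unfold mask_to_segments_alt
  cases hp : times.zip mask with
  | nil => rfl
  | cons x r =>
    obtain ⟨t, b⟩ := x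
    simp only []
    rw [starts_eq_sRec false ((t, b) :: r)]
    have hends : ((((t, b) :: r).drop 1).zip (((t, b) :: r).map Prod.snd)).filterMap
        (fun x => if x.2 && !x.1.2 then some x.1.1 else none) = eRec b r := by
      simpa using ends_eq_eRec b r
    rw [hends, getLast_snd (t, b) r]
    rw [show (if ((r.map Prod.snd).getLast?.getD b) then eRec b r ++ [pyLastD times] else eRec b r)
          = fRec (pyLastD times) b r by rw [fRec_eq]; split <;> simp]
    cases b with
    | true =>
      simpa [sRec, runsOut] using (zip_edges_eq_runs (pyLastD times) r).2 t
    | false =>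
      simpa [sRec, runsOut] using (zip_edges_eq_runs (pyLastD times) r).1

-- ===== VERDICT (by name: the statement is the Claim_ definition above) =====
theorem mask_to_segments_spec : Claim_equal_mask_to_segments := by
  intro times mask _
  show mask_to_segments times mask = mask_to_segments_alt times mask
  have hA := (aLoop_eq_runs times (times.zip mask)).1 [] none
  rw [alt_eq_runs]
  simpa [mask_to_segments, finishA] using hA
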